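-- pv_equiv track=rewrite | github.com/AshnuB425/LeetCode-Problem-Solving | 2026/Biweekly Contest 175/3823.py | reverseByType
-- ===== SOURCE A (Python) =====
-- def reverseByType(s: str) -> str:
--     spe=[]
--     nons=[]
--     s=list(s)
--     for i in s:
--         if i.isalpha():
--             spe.append(i)
--         else:
--             nons.append(i)
--     a,b=len(spe)-1,len(nons)-1
--     for i in range(len(s)):
--         if s[i].isalpha():
--             s[i]=spe[a]
--             a-=1
--         else:
--             s[i]=nons[b]
--             b-=1
--     return "".join(s)
-- ===== SOURCE B (Python) =====
-- def reverseByType(s: str) -> str: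
--     l = list(s)
--     for pred in (str.isalpha, lambda c: not c.isalpha()):
--         i, j = 0, len(l) - 1
--         while i < j:
--             if not pred(l[i]):
--                 i += 1
--             elif not pred(l[j]):
--                 j -= 1
--             else:
--                 l[i], l[j] = l[j], l[i]
--                 i += 1
--                 j -= 1
--     return "".join(l)
-- ===== Notes on version B (the rewrite author's own statement) =====
-- stated objective: alternative
-- what changed: B reverses each character class in place with two two-pointer swap passes over a single list (O(1) auxiliary space), instead of A's partition into two auxiliary buckets followed by an indexed rewrite consuming the buckets from the back.
import Mathlib
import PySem

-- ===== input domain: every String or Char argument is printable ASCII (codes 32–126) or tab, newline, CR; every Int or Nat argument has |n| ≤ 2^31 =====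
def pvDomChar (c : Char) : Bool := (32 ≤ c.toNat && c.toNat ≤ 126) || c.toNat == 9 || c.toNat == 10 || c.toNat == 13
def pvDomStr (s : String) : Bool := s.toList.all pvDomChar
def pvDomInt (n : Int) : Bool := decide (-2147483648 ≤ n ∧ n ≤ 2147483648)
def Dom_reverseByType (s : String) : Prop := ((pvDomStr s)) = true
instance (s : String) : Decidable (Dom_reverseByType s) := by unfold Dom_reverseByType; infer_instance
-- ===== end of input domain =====

-- B replaces A's partition-into-buckets + in-place rewrite with decrementing back-indices by two
-- in-place two-pointer swap passes (alternative algorithm, O(1) auxiliary space); return value proved equal.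

-- ===== PORT A =====
-- literal transliteration of A: partition chars into spe/nons, then rewrite s[i] from the
-- back of the matching bucket (counters a, b).  pyGetD/pySetD defaults are never used: the
-- counters stay in range because exactly len(spe) positions are alphabetic.
def reverseByType (s : String) : String :=
  let sl := s.toList
  let part := sl.foldl (fun (st : List Char × List Char) i =>
      if PySem.Chars.isalpha i then (st.1 ++ [i], st.2) else (st.1, st.2 ++ [i])) ([], [])
  let spe := part.1
  let nons := part.2
  let fin := (PySem.List.pyRange 0 (sl.length : Int) 1).foldl
      (fun (st : List Char × Int × Int) i =>
        if PySem.Chars.isalpha (PySem.List.pyGetD st.1 i ' ') then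
          (PySem.List.pySetD st.1 i (PySem.List.pyGetD spe st.2.1 ' '), st.2.1 - 1, st.2.2)
        else
          (PySem.List.pySetD st.1 i (PySem.List.pyGetD nons st.2.2 ' '), st.2.1, st.2.2 - 1))
      (sl, ((spe.length : Int) - 1, (nons.length : Int) - 1))
  String.ofList fin.1

-- ===== PORT B =====
-- one two-pointer pass: skip chars failing pred from both ends, swap matching pairs
def pvTpLoop (p : Char → Bool) (l : List Char) (i j : Nat) : List Char :=
  if i < j then
    if ¬ p (l.getD i ' ') then pvTpLoop p l (i + 1) j
    else if ¬ p (l.getD j ' ') then pvTpLoop p l i (j - 1)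
    else pvTpLoop p ((l.set i (l.getD j ' ')).set j (l.getD i ' ')) (i + 1) (j - 1)
  else l
termination_by j - i
decreasing_by all_goals omega

def reverseByType_alt (s : String) : String :=
  let l := s.toList
  let l1 := pvTpLoop (fun c => PySem.Chars.isalpha c) l 0 (l.length - 1)
  let l2 := pvTpLoop (fun c => ! PySem.Chars.isalpha c) l1 0 (l1.length - 1)
  String.ofList l2

-- ===== PRECONDITION & SPEC =====
def Spec_reverseByType (s : String) (out : String) : Prop := out = reverseByType_alt s
instance (s : String) (out : String) : Decidable (Spec_reverseByType s out) := by unfold Spec_reverseByType; infer_instance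

-- ===== CLAIM (what is proved, stated in full; the proofs are below) =====
def Claim_equal_reverseByType : Prop := ∀ (s : String), Dom_reverseByType s → Spec_reverseByType s (reverseByType s)

-- ===== LEMMAS AND PROOFS =====

-- model: refill the p-positions of l with the stream `as`, keep the rest
def pvRefill (p : Char → Bool) : List Char → List Char → List Char
  | _, [] => []
  | as, c :: cs => if p c then as.headD ' ' :: pvRefill p as.tail cs else c :: pvRefill p as cs

-- model: refill p-positions from `as` and the others from `ns`, in one pass
def pvRefill2 (p : Char → Bool) : List Char → List Char → List Char → List Char
  | _, _, [] => []
  | as, ns, c :: cs =>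
      if p c then as.headD ' ' :: pvRefill2 p as.tail ns cs
      else ns.headD ' ' :: pvRefill2 p as ns.tail cs

-- reverse the p-chars of l in place
def pvRepl (p : Char → Bool) (l : List Char) : List Char :=
  pvRefill p ((l.filter p).reverse) l

theorem pvRefill_append_singleton (p : Char → Bool) (d : Char) (hd : ¬ p d = true) :
    ∀ (w as : List Char), pvRefill p as (w ++ [d]) = pvRefill p as w ++ [d] := by
  intro w
  induction w with
  | nil => intro as; simp [pvRefill, hd]
  | cons c cs ih => intro as; by_cases hc : p c = true <;> simp [pvRefill, hc, ih]

theorem pvRefill_snoc_snoc (p : Char → Bool) (d : Char) (hd : p d = true) :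
    ∀ (mid xs : List Char) (e : Char), xs.length = mid.countP p →
      pvRefill p (xs ++ [e]) (mid ++ [d]) = pvRefill p xs mid ++ [e] := by
  intro mid
  induction mid with
  | nil =>
      intro xs e hlen
      have : xs = [] := List.eq_nil_of_length_eq_zero (by simpa using hlen)
      subst this; simp [pvRefill, hd]
  | cons m ms ih =>
      intro xs e hlen
      by_cases hm : p m = true
      · have hx : xs ≠ [] := by
          intro h; subst h; simp [hm] at hlen
        obtain ⟨x, xs', rfl⟩ := List.exists_cons_of_ne_nil hx
        have hlen' : xs'.length = ms.countP p := by
          simp [hm] at hlen; omega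
        simp [pvRefill, hm, ih xs' e hlen']
      · simp [hm] at hlen
        simp [pvRefill, hm, ih xs e hlen]

theorem pvRepl_short (p : Char → Bool) (w : List Char) (hw : w.length ≤ 1) :
    pvRepl p w = w := by
  match w, hw with
  | [], _ => rfl
  | [c], _ =>
      by_cases hc : p c = true <;> simp [pvRepl, List.filter, hc, pvRefill]

theorem pvRepl_cons_not (p : Char → Bool) (c : Char) (w : List Char) (hc : ¬ p c = true) :
    pvRepl p (c :: w) = c :: pvRepl p w := by
  simp [pvRepl, List.filter_cons, hc, pvRefill]

theorem pvRepl_snoc_not (p : Char → Bool) (d : Char) (w : List Char) (hd : ¬ p d = true) :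
    pvRepl p (w ++ [d]) = pvRepl p w ++ [d] := by
  simp only [pvRepl, List.filter_append, List.filter_cons, hd]
  simp [pvRefill_append_singleton p d hd]

theorem pvRepl_wrap (p : Char → Bool) (c d : Char) (mid : List Char)
    (hc : p c = true) (hd : p d = true) :
    pvRepl p (c :: (mid ++ [d])) = d :: (pvRepl p mid ++ [c]) := by
  have hfil : (List.filter p (c :: (mid ++ [d]))).reverse
      = d :: ((List.filter p mid).reverse ++ [c]) := by
    simp [List.filter_cons, List.filter_append, hc, hd]
  simp only [pvRepl, hfil, pvRefill, hc, if_pos]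
  simp only [List.headD_cons, List.tail_cons]
  rw [pvRefill_snoc_snoc p d hd mid ((List.filter p mid).reverse) c
    (by simp [List.countP_eq_length_filter])]

-- list surgery around a double set (the swap in the two-pointer loop)
theorem pvSet2_take (l : List Char) (i j : Nat) (c d : Char) (hij : i < j) (hj : j < l.length) :
    ((l.set i d).set j c).take (i+1) = l.take i ++ [d] := by
  apply List.ext_getElem
  · simp; omega
  · intro k h1 h2
    simp at h1 h2
    simp [List.getElem_take, List.getElem_set, List.getElem_append]
    split_ifs <;> (try rfl) <;> omega

theorem pvSet2_drop (l : List Char) (i j : Nat) (c d : Char) (hij : i < j) (hj : j < l.length) :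
    ((l.set i d).set j c).drop j = c :: l.drop (j+1) := by
  apply List.ext_getElem
  · simp; omega
  · intro k h1 h2
    simp at h1 h2
    match k with
    | 0 => simp [List.getElem_drop, List.getElem_set]
    | k+1 =>
      simp [List.getElem_drop, List.getElem_set, List.getElem_cons_succ]
      split_ifs <;> first | rfl | omega | (congr 1; omega)

theorem pvSet2_mid (l : List Char) (i j : Nat) (c d : Char) (hij : i < j) :
    (((l.set i d).set j c).drop (i+1)).take (j-i-1) = (l.drop (i+1)).take (j-i-1) := by
  apply List.ext_getElem
  · simp
  · intro k h1 h2
    simp at h1 h2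
    simp [List.getElem_take, List.getElem_drop, List.getElem_set]
    split_ifs <;> (try rfl) <;> omega

-- the two-pointer pass reverses the p-chars of the window [i..j] and fixes everything else
theorem pvTpLoop_base (p : Char → Bool) (l : List Char) (i j : Nat)
    (hj : j < l.length) (hij : i ≤ j + 1) (h : ¬ i < j) :
    l = l.take i ++ pvRepl p ((l.drop i).take (j + 1 - i)) ++ l.drop (j + 1) := by
  rcases Nat.eq_or_lt_of_le hij with hE | hlt
  · -- i = j + 1 : empty window
    rw [hE]
    simp [pvRepl, pvRefill]
  · have hE : i = j := by omega
    subst hE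
    have hw : (l.drop i).take (i + 1 - i) = [l[i]] := by
      rw [(by omega : i + 1 - i = 1), List.drop_eq_getElem_cons hj]
      rfl
    rw [hw, pvRepl_short p _ (by simp)]
    conv_lhs => rw [← List.take_append_drop i l]
    rw [List.drop_eq_getElem_cons hj]
    simp

theorem pvTpLoop_eq (p : Char → Bool) :
    ∀ (n : Nat) (l : List Char) (i j : Nat), j - i ≤ n → j < l.length → i ≤ j + 1 →
      pvTpLoop p l i j = l.take i ++ pvRepl p ((l.drop i).take (j + 1 - i)) ++ l.drop (j + 1) := by
  intro n
  induction n with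
  | zero =>
      intro l i j hn hj hij
      rw [pvTpLoop, if_neg (by omega : ¬ i < j)]
      exact pvTpLoop_base p l i j hj hij (by omega)
  | succ n ih =>
      intro l i j hn hj hij
      by_cases h : i < j
      · have hi : i < l.length := by omega
        have hgi : l.getD i ' ' = l[i] := List.getD_eq_getElem l ' ' hi
        have hgj : l.getD j ' ' = l[j] := List.getD_eq_getElem l ' ' hj
        rw [pvTpLoop, if_pos h, hgi, hgj]
        by_cases hpi : p l[i] = true
        · rw [if_neg (not_not_intro hpi)]
          by_cases hpj : p l[j] = true
          · -- swap case
            rw [if_neg (not_not_intro hpj)]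
            rw [ih ((l.set i l[j]).set j l[i]) (i+1) (j-1) (by omega) (by simp; omega) (by omega)]
            have e1 : ((l.set i l[j]).set j l[i]).take (i+1) = l.take i ++ [l[j]] :=
              pvSet2_take l i j l[i] l[j] h hj
            have e2 : (((l.set i l[j]).set j l[i]).drop (i+1)).take (j-1+1-(i+1))
                = (l.drop (i+1)).take (j-i-1) := by
              rw [(by omega : j-1+1-(i+1) = j-i-1)]
              exact pvSet2_mid l i j l[i] l[j] h
            have e3 : ((l.set i l[j]).set j l[i]).drop (j-1+1) = l[i] :: l.drop (j+1) := by
              rw [(by omega : j-1+1 = j)]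
              exact pvSet2_drop l i j l[i] l[j] h hj
            have hwin : (l.drop i).take (j + 1 - i)
                = l[i] :: ((l.drop (i+1)).take (j-i-1) ++ [l[j]]) := by
              rw [List.drop_eq_getElem_cons hi, (by omega : j + 1 - i = (j-i-1) + 1 + 1)]
              rw [List.take_succ_cons]
              congr 1
              rw [List.take_succ_eq_append_getElem (by simp; omega)]
              congr 2
              rw [List.getElem_drop]
              congr 1
              omega
            rw [e1, e2, e3, hwin, pvRepl_wrap p l[i] l[j] _ hpi hpj]
            simp
          · -- retreat j
            rw [if_pos hpj]
            rw [ih l i (j-1) (by omega) (by omega) (by omega)]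
            have hwin : (l.drop i).take (j + 1 - i)
                = (l.drop i).take (j-1+1-i) ++ [l[j]] := by
              rw [(by omega : j + 1 - i = (j-1+1-i) + 1)]
              rw [List.take_succ_eq_append_getElem (by simp; omega)]
              congr 2
              rw [List.getElem_drop]
              congr 1
              omega
            rw [hwin, pvRepl_snoc_not p l[j] _ hpj]
            rw [(by omega : j-1+1 = j), List.drop_eq_getElem_cons hj]
            simp
        · -- advance i
          rw [if_pos hpi]
          rw [ih l (i+1) j (by omega) hj (by omega)]
          have hwin : (l.drop i).take (j + 1 - i)
              = l[i] :: (l.drop (i+1)).take (j+1-(i+1)) := by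
            rw [List.drop_eq_getElem_cons hi, (by omega : j + 1 - i = (j+1-(i+1)) + 1)]
            rw [List.take_succ_cons]
          rw [hwin, pvRepl_cons_not p l[i] _ hpi]
          conv_rhs => rw [← List.singleton_append, ← List.append_assoc,
            ← List.take_succ_eq_append_getElem hi]
      · rw [pvTpLoop, if_neg h]
        exact pvTpLoop_base p l i j hj hij h

theorem pvTp_whole (p : Char → Bool) (l : List Char) :
    pvTpLoop p l 0 (l.length - 1) = pvRepl p l := by
  cases l with
  | nil => rw [pvTpLoop]; rfl
  | cons c cs =>
      rw [pvTpLoop_eq p (cs.length) (c :: cs) 0 ((c :: cs).length - 1)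
        (by simp) (by simp) (by omega)]
      simp

theorem pvFilter_not_pvRefill (p : Char → Bool) :
    ∀ (l as : List Char), (∀ x ∈ as, p x = true) → as.length = l.countP p →
      (pvRefill p as l).filter (fun c => ! p c) = l.filter (fun c => ! p c) := by
  intro l
  induction l with
  | nil => intro as _ _; rfl
  | cons c cs ih =>
      intro as hmem hlen
      by_cases hc : p c = true
      · have hx : as ≠ [] := by
          intro h; subst h; simp [hc] at hlen
        obtain ⟨a, as', rfl⟩ := List.exists_cons_of_ne_nil hx
        have hpa : p a = true := hmem a (by simp)
        have : as'.length = cs.countP p := by simp [hc] at hlen; omega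
        simp [pvRefill, hc, List.filter_cons, hpa,
          ih as' (fun x hx => hmem x (by simp [hx])) this]
      · simp [hc] at hlen
        simp [pvRefill, hc, List.filter_cons, ih as hmem hlen]

theorem pvRefill_compose (p : Char → Bool) :
    ∀ (l as ns : List Char), (∀ x ∈ as, p x = true) → as.length = l.countP p →
      pvRefill (fun c => ! p c) ns (pvRefill p as l) = pvRefill2 p as ns l := by
  intro l
  induction l with
  | nil => intro as ns _ _; rfl
  | cons c cs ih =>
      intro as ns hmem hlen
      by_cases hc : p c = true
      · have hx : as ≠ [] := by
          intro h; subst h; simp [hc] at hlen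
        obtain ⟨a, as', rfl⟩ := List.exists_cons_of_ne_nil hx
        have hpa : p a = true := hmem a (by simp)
        have hlen' : as'.length = cs.countP p := by simp [hc] at hlen; omega
        simp [pvRefill, pvRefill2, hc, hpa,
          ih as' ns (fun x hx => hmem x (by simp [hx])) hlen']
      · simp [hc] at hlen
        simp only [pvRefill, pvRefill2, hc, if_neg, Bool.not_eq_true, if_false]
        simp [ih as ns.tail hmem hlen]

-- B computes the one-pass double refill
theorem pvB_eq (l : List Char) :
    pvTpLoop (fun c => ! PySem.Chars.isalpha c)
      (pvTpLoop (fun c => PySem.Chars.isalpha c) l 0 (l.length - 1)) 0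
      ((pvTpLoop (fun c => PySem.Chars.isalpha c) l 0 (l.length - 1)).length - 1)
    = pvRefill2 PySem.Chars.isalpha
        ((l.filter PySem.Chars.isalpha).reverse)
        ((l.filter (fun c => ! PySem.Chars.isalpha c)).reverse) l := by
  have e1 : pvTpLoop (fun c => PySem.Chars.isalpha c) l 0 (l.length - 1)
      = pvRefill PySem.Chars.isalpha ((l.filter PySem.Chars.isalpha).reverse) l := by
    rw [pvTp_whole]; rfl
  have hmem : ∀ x ∈ (l.filter PySem.Chars.isalpha).reverse, PySem.Chars.isalpha x = true := by
    intro x hx; exact List.of_mem_filter (List.mem_reverse.mp hx)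
  have hlen : ((l.filter PySem.Chars.isalpha).reverse).length
      = l.countP PySem.Chars.isalpha := by
    simp [List.countP_eq_length_filter]
  rw [e1, pvTp_whole, pvRepl,
    pvFilter_not_pvRefill PySem.Chars.isalpha l _ hmem hlen,
    pvRefill_compose PySem.Chars.isalpha l _ _ hmem hlen]

-- A's first loop is a partition into (filter p, filter !p)
theorem pvPartition_fold :
    ∀ (l acc1 acc2 : List Char),
      l.foldl (fun (st : List Char × List Char) i =>
          if PySem.Chars.isalpha i then (st.1 ++ [i], st.2) else (st.1, st.2 ++ [i]))
        (acc1, acc2)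
      = (acc1 ++ l.filter PySem.Chars.isalpha,
         acc2 ++ l.filter (fun c => ! PySem.Chars.isalpha c)) := by
  intro l
  induction l with
  | nil => intro acc1 acc2; simp
  | cons c cs ih =>
      intro acc1 acc2
      by_cases hc : PySem.Chars.isalpha c = true <;>
        simp [List.foldl_cons, hc, ih, List.filter_cons]

theorem pvGetD_append_len (done cs : List Char) (c d : Char) :
    (done ++ c :: cs).getD done.length d = c := by
  rw [List.getD_eq_getElem _ _ (by simp)]
  simp

theorem pvSet_append_len (done cs : List Char) (c v : Char) :
    (done ++ c :: cs).set done.length v = done ++ v :: cs := by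
  induction done with
  | nil => rfl
  | cons x xs ih => simp [List.set, ih]

theorem pvGetD_back (xs : List Char) (k : Nat) (hk : k < xs.length) :
    PySem.List.pyGetD xs ((xs.length : Int) - 1 - k) ' ' = (xs.reverse.drop k).headD ' ' := by
  rw [PySem.List.pyGetD_eq_getElem xs ' ' (by omega) (by push_cast; omega)]
  rw [List.headD_eq_head?_getD, List.head?_drop]
  rw [List.getElem?_eq_getElem (by simpa using hk)]
  simp [List.getElem_reverse]

-- A's second loop consumes spe and nons from the back, i.e. their reverses from the front
theorem pvFoldA (spe nons : List Char) :
    ∀ (todo done : List Char) (ca cb : Nat),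
      ca + todo.countP PySem.Chars.isalpha = spe.length →
      cb + todo.countP (fun c => ! PySem.Chars.isalpha c) = nons.length →
      ((PySem.List.pyRange (done.length : Int) ((done.length : Int) + (todo.length : Int)) 1).foldl
        (fun (st : List Char × Int × Int) i =>
          if PySem.Chars.isalpha (PySem.List.pyGetD st.1 i ' ') then
            (PySem.List.pySetD st.1 i (PySem.List.pyGetD spe st.2.1 ' '), st.2.1 - 1, st.2.2)
          else
            (PySem.List.pySetD st.1 i (PySem.List.pyGetD nons st.2.2 ' '), st.2.1, st.2.2 - 1))
        (done ++ todo, ((spe.length : Int) - 1 - ca, (nons.length : Int) - 1 - cb))).1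
      = done ++ pvRefill2 PySem.Chars.isalpha (spe.reverse.drop ca) (nons.reverse.drop cb) todo := by
  intro todo
  induction todo with
  | nil =>
      intro done ca cb hca hcb
      rw [show ((done.length : Int) + (([] : List Char).length : Int)) = (done.length : Int) by simp]
      rw [PySem.List.pyRange_one_eq_nil (le_refl _)]
      simp [pvRefill2]
  | cons c cs ih =>
      intro done ca cb hca hcb
      have hlt : (done.length : Int) < (done.length : Int) + (((c :: cs).length : Nat) : Int) := by
        rw [List.length_cons]; push_cast; omega
      rw [PySem.List.pyRange_one_cons hlt, List.foldl_cons]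
      have hget : PySem.List.pyGetD (done ++ c :: cs) ((done.length : Nat) : Int) ' ' = c := by
        rw [PySem.List.pyGetD_natCast]
        exact pvGetD_append_len done cs c ' '
      by_cases hc : PySem.Chars.isalpha c = true
      · have hcnt : (c :: cs).countP PySem.Chars.isalpha
            = cs.countP PySem.Chars.isalpha + 1 := by
          rw [List.countP_cons]; simp [hc]
        have hca' : ca < spe.length := by omega
        have hv : PySem.List.pyGetD spe ((spe.length : Int) - 1 - ca) ' '
            = (spe.reverse.drop ca).headD ' ' := pvGetD_back spe ca hca'
        have hset : PySem.List.pySetD (done ++ c :: cs) ((done.length : Nat) : Int)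
            ((spe.reverse.drop ca).headD ' ')
            = done ++ (spe.reverse.drop ca).headD ' ' :: cs := by
          rw [PySem.List.pySetD_natCast]
          exact pvSet_append_len done cs c _
        simp only [hget]
        rw [if_pos hc, hv, hset]
        have hcnt2 : (c :: cs).countP (fun c => ! PySem.Chars.isalpha c)
            = cs.countP (fun c => ! PySem.Chars.isalpha c) := by
          rw [List.countP_cons]; simp [hc]
        have hca'' : (ca + 1) + cs.countP PySem.Chars.isalpha = spe.length := by omega
        have hcb' : cb + cs.countP (fun c => ! PySem.Chars.isalpha c) = nons.length := by omega
        have key := ih (done ++ (spe.reverse.drop ca).headD ' ' :: []) (ca + 1) cb hca'' hcb'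
        rw [show (((done ++ (spe.reverse.drop ca).headD ' ' :: []).length : Nat) : Int)
              = (done.length : Int) + 1 by simp] at key
        rw [show ((spe.length : Int) - 1 - ((ca + 1 : Nat) : Int))
              = (spe.length : Int) - 1 - (ca : Int) - 1 by push_cast; ring] at key
        rw [show ((done.length : Int) + 1 + ((cs.length : Nat) : Int))
              = (done.length : Int) + (((c :: cs).length : Nat) : Int) by rw [List.length_cons]; push_cast; ring] at key
        simp only [List.append_assoc, List.singleton_append] at key
        rw [key]
        simp [pvRefill2, hc, List.tail_drop]
      · have hcnt : (c :: cs).countP (fun c => ! PySem.Chars.isalpha c)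
            = cs.countP (fun c => ! PySem.Chars.isalpha c) + 1 := by
          rw [List.countP_cons]; simp [hc]
        have hcb' : cb < nons.length := by omega
        have hv : PySem.List.pyGetD nons ((nons.length : Int) - 1 - cb) ' '
            = (nons.reverse.drop cb).headD ' ' := pvGetD_back nons cb hcb'
        have hset : PySem.List.pySetD (done ++ c :: cs) ((done.length : Nat) : Int)
            ((nons.reverse.drop cb).headD ' ')
            = done ++ (nons.reverse.drop cb).headD ' ' :: cs := by
          rw [PySem.List.pySetD_natCast]
          exact pvSet_append_len done cs c _
        simp only [hget]
        rw [if_neg hc, hv, hset]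
        have hcnt2 : (c :: cs).countP PySem.Chars.isalpha
            = cs.countP PySem.Chars.isalpha := by
          rw [List.countP_cons]; simp [hc]
        have hca'' : ca + cs.countP PySem.Chars.isalpha = spe.length := by omega
        have hcb'' : (cb + 1) + cs.countP (fun c => ! PySem.Chars.isalpha c) = nons.length := by omega
        have key := ih (done ++ (nons.reverse.drop cb).headD ' ' :: []) ca (cb + 1) hca'' hcb''
        rw [show (((done ++ (nons.reverse.drop cb).headD ' ' :: []).length : Nat) : Int)
              = (done.length : Int) + 1 by simp] at key
        rw [show ((nons.length : Int) - 1 - ((cb + 1 : Nat) : Int))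
              = (nons.length : Int) - 1 - (cb : Int) - 1 by push_cast; ring] at key
        rw [show ((done.length : Int) + 1 + ((cs.length : Nat) : Int))
              = (done.length : Int) + (((c :: cs).length : Nat) : Int) by rw [List.length_cons]; push_cast; ring] at key
        simp only [List.append_assoc, List.singleton_append] at key
        rw [key]
        simp [pvRefill2, hc, List.tail_drop]

theorem pvFoldA_zero (spe nons todo : List Char)
    (hca : todo.countP PySem.Chars.isalpha = spe.length)
    (hcb : todo.countP (fun c => ! PySem.Chars.isalpha c) = nons.length) :
    ((PySem.List.pyRange 0 ((todo.length : Nat) : Int) 1).foldl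
      (fun (st : List Char × Int × Int) i =>
        if PySem.Chars.isalpha (PySem.List.pyGetD st.1 i ' ') then
          (PySem.List.pySetD st.1 i (PySem.List.pyGetD spe st.2.1 ' '), st.2.1 - 1, st.2.2)
        else
          (PySem.List.pySetD st.1 i (PySem.List.pyGetD nons st.2.2 ' '), st.2.1, st.2.2 - 1))
      (todo, ((spe.length : Int) - 1, (nons.length : Int) - 1))).1
    = pvRefill2 PySem.Chars.isalpha spe.reverse nons.reverse todo := by
  have h := pvFoldA spe nons todo [] 0 0 (by simpa using hca) (by simpa using hcb)
  simpa using h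

-- ===== VERDICT (by name: the statement is the Claim_ definition above) =====
theorem reverseByType_spec : Claim_equal_reverseByType := by
  unfold Claim_equal_reverseByType
  intro s _
  unfold Spec_reverseByType reverseByType reverseByType_alt
  simp only [pvPartition_fold, List.nil_append]
  rw [pvFoldA_zero _ _ s.toList
    (by simp [List.countP_eq_length_filter])
    (by simp [List.countP_eq_length_filter])]
  rw [pvB_eq]
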